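-- pv_equiv track=rewrite | github.com/alamtamboli/speech-scorer | backend/app/score_engine.py | match_keyword_groups
-- ===== SOURCE A (Python) =====
-- from typing import Optional, List, Dict, Any
--
-- def match_keyword_groups(transcript: str, groups: List[List[str]]) -> int:
--     """Return number of groups matched (group matched if any keyword in group found)."""
--     lc = transcript.lower()
--     matched = 0
--     for grp in groups:
--         for kw in grp:
--             if kw.lower() in lc:
--                 matched += 1
--                 break
--     return matched
-- ===== SOURCE B (Python) =====
-- def match_keyword_groups(transcript, groups):
--     """Return number of groups matched (group matched if any keyword in group found)."""
--     lc = transcript.lower()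
--     # position-driven scan: walk the transcript once; at each start position test the
--     # still-unmatched groups' keywords as prefixes, retiring a group when it matches
--     remaining = [[kw.lower() for kw in grp] for grp in groups]
--     matched = 0
--     for i in range(len(lc) + 1):
--         still = []
--         for kws in remaining:
--             if any(lc.startswith(k, i) for k in kws):
--                 matched += 1
--             else:
--                 still.append(kws)
--         remaining = still
--     return matched
-- ===== Notes on version B (the rewrite author's own statement) =====
-- stated objective: alternative
-- what changed: Replaced A's per-keyword substring search (each keyword scanned against the transcript independently) by a single position-driven scan of the lowered transcript that tests the still-unmatched groups' keywords as prefixes at each start position and retires a group as soon as it matches.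
import Mathlib
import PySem

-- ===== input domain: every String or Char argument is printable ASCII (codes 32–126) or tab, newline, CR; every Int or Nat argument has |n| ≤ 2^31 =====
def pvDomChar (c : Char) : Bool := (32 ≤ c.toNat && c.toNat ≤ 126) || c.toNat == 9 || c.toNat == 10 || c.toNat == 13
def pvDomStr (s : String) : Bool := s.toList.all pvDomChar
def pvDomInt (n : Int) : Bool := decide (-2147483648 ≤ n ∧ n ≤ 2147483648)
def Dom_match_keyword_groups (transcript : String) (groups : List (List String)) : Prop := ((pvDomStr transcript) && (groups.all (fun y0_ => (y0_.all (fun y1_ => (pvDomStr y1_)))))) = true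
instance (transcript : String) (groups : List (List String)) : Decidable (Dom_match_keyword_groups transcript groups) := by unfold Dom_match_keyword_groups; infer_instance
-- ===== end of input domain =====

-- B replaces A's per-keyword substring search by a single position-driven scan of the
-- transcript that tests pending groups' keywords as prefixes and retires matched groups;
-- alternative traversal, same cost.


-- ===== PORT A =====
-- inner 'for kw in grp: if kw.lower() in lc: matched += 1; break'
def pvInnerA (lc : String) : List String → Bool
  | [] => false
  | kw :: rest => if PySem.Str.isIn (PySem.Str.lower kw) lc then true else pvInnerA lc rest

def match_keyword_groups (transcript : String) (groups : List (List String)) : Int :=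
  let lc := PySem.Str.lower transcript
  groups.foldl (fun matched grp => if pvInnerA lc grp then matched + 1 else matched) 0

-- ===== PORT B =====
-- 'lc.startswith(k, i)' for 0 ≤ i ≤ len(lc): exactly k prefix of lc[i:] (ported by hand)
def pvStartsAt (lc : List Char) (i : Nat) (k : List Char) : Bool := k.isPrefixOf (lc.drop i)

def match_keyword_groups_alt (transcript : String) (groups : List (List String)) : Int :=
  let lc := (PySem.Str.lower transcript).toList
  let remaining := groups.map (fun grp => grp.map (fun kw => (PySem.Str.lower kw).toList))
  let res := (List.range (lc.length + 1)).foldl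
    (fun st i =>
      st.2.foldl
        (fun st2 kws =>
          if kws.any (fun k => pvStartsAt lc i k) then (st2.1 + 1, st2.2)
          else (st2.1, st2.2 ++ [kws]))
        (st.1, ([] : List (List (List Char)))))
    ((0 : Int), remaining)
  res.1

-- ===== PRECONDITION & SPEC =====
def Spec_match_keyword_groups (transcript : String) (groups : List (List String)) (out : Int) : Prop := out = match_keyword_groups_alt transcript groups
instance (transcript : String) (groups : List (List String)) (out : Int) : Decidable (Spec_match_keyword_groups transcript groups out) := by unfold Spec_match_keyword_groups; infer_instance

-- ===== CLAIM (what is proved, stated in full; the proofs are below) =====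
def Claim_equal_match_keyword_groups : Prop := ∀ (transcript : String) (groups : List (List String)), Dom_match_keyword_groups transcript groups → Spec_match_keyword_groups transcript groups (match_keyword_groups transcript groups)

-- ===== LEMMAS AND PROOFS =====

-- A group hits at some position of the list ps
def pvHitAny (lc : List Char) (ps : List Nat) (kws : List (List Char)) : Bool :=
  ps.any (fun i => kws.any (fun k => pvStartsAt lc i k))

-- B's inner fold: adds the count of groups hitting at i, keeps the rest in order
lemma pvInner_fold (lc : List Char) (i : Nat) (rem : List (List (List Char)))
    (m : Int) (acc : List (List (List Char))) :
    rem.foldl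
      (fun st2 kws =>
        if kws.any (fun k => pvStartsAt lc i k) then (st2.1 + 1, st2.2)
        else (st2.1, st2.2 ++ [kws])) (m, acc)
    = (m + (rem.countP (fun kws => kws.any (fun k => pvStartsAt lc i k)) : Int),
       acc ++ rem.filter (fun kws => !kws.any (fun k => pvStartsAt lc i k))) := by
  induction rem generalizing m acc with
  | nil => simp
  | cons kws rest ih =>
    simp only [List.foldl, List.countP_cons, List.filter_cons]
    by_cases h : kws.any (fun k => pvStartsAt lc i k)
    · rw [if_pos h, ih]
      simp [h]
      ring
    · rw [if_neg h, ih]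
      simp [h]

-- count splitting: hits at i::ps = hits at i + hits at ps among the survivors of i
lemma pvCount_split (lc : List Char) (i : Nat) (ps : List Nat) (rem : List (List (List Char))) :
    rem.countP (fun kws => pvHitAny lc (i :: ps) kws)
    = rem.countP (fun kws => kws.any (fun k => pvStartsAt lc i k))
      + (rem.filter (fun kws => !kws.any (fun k => pvStartsAt lc i k))).countP
          (fun kws => pvHitAny lc ps kws) := by
  have hpt : (fun kws => pvHitAny lc (i :: ps) kws)
      = (fun kws : List (List Char) =>
          ((kws.any fun k => pvStartsAt lc i k) || pvHitAny lc ps kws)) := by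
    funext kws
    simp [pvHitAny, List.any_cons]
  rw [hpt]
  induction rem with
  | nil => simp
  | cons kws rest ih =>
    simp only [List.countP_cons, List.filter_cons]
    by_cases h : (kws.any fun k => pvStartsAt lc i k) = true
    · simp only [h, Bool.true_or, Bool.not_true]
      rw [ih]
      simp
      omega
    · simp only [Bool.not_eq_true] at h
      simp only [h, Bool.false_or, Bool.not_false]
      by_cases h2 : pvHitAny lc ps kws = true
      · simp only [h2]
        rw [ih]
        simp [h2]
        omega
      · simp only [Bool.not_eq_true] at h2
        simp only [h2]
        rw [ih]
        simp [h2]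

-- B's outer fold invariant
lemma pvOuter_fold (lc : List Char) (ps : List Nat) (rem : List (List (List Char))) (m : Int) :
    ((ps.foldl
      (fun st i =>
        st.2.foldl
          (fun st2 kws =>
            if kws.any (fun k => pvStartsAt lc i k) then (st2.1 + 1, st2.2)
            else (st2.1, st2.2 ++ [kws]))
          (st.1, ([] : List (List (List Char)))))
      (m, rem)).1 : Int)
    = m + (rem.countP (fun kws => pvHitAny lc ps kws) : Int) := by
  induction ps generalizing rem m with
  | nil => simp [pvHitAny]
  | cons i ps ih =>
    simp only [List.foldl_cons]
    rw [pvInner_fold, List.nil_append, ih, pvCount_split]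
    push_cast
    ring

-- a keyword occurs somewhere iff it is a prefix at some scanned position i ≤ |lc|
lemma pvHit_iff_isIn (lc k : List Char) :
    ((List.range (lc.length + 1)).any (fun i => pvStartsAt lc i k))
      = PySem.Chars.isIn k lc := by
  by_cases h : PySem.Chars.isIn k lc = true
  · rw [h]
    obtain ⟨j, hj⟩ := (PySem.Chars.exists_prefix_drop_iff_isIn (sub := k) (s := lc)).2 h
    simp only [List.any_eq_true, List.mem_range]
    by_cases hle : j ≤ lc.length
    · exact ⟨j, by omega, by simpa [pvStartsAt, List.isPrefixOf_iff_prefix] using hj⟩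
    · refine ⟨lc.length, by omega, ?_⟩
      have hd : lc.drop j = [] := List.drop_eq_nil_of_le (by omega)
      rw [hd] at hj
      have hk : k = [] := List.prefix_nil.mp hj
      simp [pvStartsAt, hk]
  · rw [eq_false_of_ne_true h]
    simp only [List.any_eq_false, List.mem_range]
    intro i _
    by_contra hc
    simp only [pvStartsAt, List.isPrefixOf_iff_prefix] at hc
    exact h ((PySem.Chars.exists_prefix_drop_iff_isIn (sub := k) (s := lc)).1 ⟨i, hc⟩)

-- Bool 'any' distributes over a pointwise disjunction
lemma pvAny_or (ps : List Nat) (f g : Nat → Bool) :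
    ps.any (fun i => f i || g i) = (ps.any f || ps.any g) := by
  induction ps with
  | nil => rfl
  | cons j t ih =>
    simp only [List.any_cons, ih]
    cases f j <;> cases g j <;> simp

lemma pvInnerA_cons (lc : String) (kw : String) (rest : List String) :
    pvInnerA lc (kw :: rest)
      = (PySem.Str.isIn (PySem.Str.lower kw) lc || pvInnerA lc rest) := by
  show (if PySem.Str.isIn (PySem.Str.lower kw) lc then true else pvInnerA lc rest) = _
  cases h : PySem.Str.isIn (PySem.Str.lower kw) lc <;> simp

-- per group: B's hit-anywhere test equals A's break-loop
lemma pvGroup_eq (lc : String) (grp : List String) :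
    pvHitAny lc.toList (List.range (lc.toList.length + 1))
        (grp.map (fun kw => (PySem.Str.lower kw).toList))
      = pvInnerA lc grp := by
  induction grp with
  | nil => simp [pvHitAny, pvInnerA]
  | cons kw rest ih =>
    rw [pvInnerA_cons, ← ih, List.map_cons]
    show (List.range (lc.toList.length + 1)).any
        (fun i => (PySem.Str.lower kw).toList.isPrefixOf (lc.toList.drop i)
          || (rest.map (fun kw => (PySem.Str.lower kw).toList)).any (fun k => pvStartsAt lc.toList i k)) = _
    rw [pvAny_or]
    congr 1
    have := pvHit_iff_isIn lc.toList (PySem.Str.lower kw).toList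
    simp only [pvStartsAt] at this
    rw [this]
    rw [PySem.Str.isIn_eq]

-- A's fold is a countP
lemma pvA_countP (lc : String) (groups : List (List String)) (m : Int) :
    groups.foldl (fun matched grp => if pvInnerA lc grp then matched + 1 else matched) m
      = m + (groups.countP (fun grp => pvInnerA lc grp) : Int) := by
  induction groups generalizing m with
  | nil => simp
  | cons g t ih =>
    simp only [List.foldl, List.countP_cons]
    by_cases h : pvInnerA lc g
    · rw [if_pos h, ih]
      simp [h]
      ring
    · rw [if_neg h, ih]
      simp [h]

theorem pv_main (transcript : String) (groups : List (List String)) :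
    match_keyword_groups transcript groups = match_keyword_groups_alt transcript groups := by
  unfold match_keyword_groups match_keyword_groups_alt
  rw [pvOuter_fold, pvA_countP]
  simp only [zero_add, List.countP_map]
  norm_cast
  apply List.countP_congr
  intro grp _
  simpa [Function.comp] using (pvGroup_eq (PySem.Str.lower transcript) grp).symm

-- ===== VERDICT (by name: the statement is the Claim_ definition above) =====
theorem match_keyword_groups_spec : Claim_equal_match_keyword_groups := by
  intro t g _
  exact pv_main t g
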